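-- pv_equiv track=rewrite | github.com/HalmaiBalazs/Hazik | 2.py | decrement_even_digits
-- ===== SOURCE A (Python) =====
-- def decrement_even_digits(original:str)->str:
--     result = ""
--     for i in range(len(original)):
--         if original[i].isdigit() and int(original[i]) % 2 == 0:
--             if int(original[i]) == 0:
--                 result += "9"
--             else:
--                 result += str(int(original[i]) - 1)
--         else:
--             result += original[i]
--     return result
-- ===== SOURCE B (Python) =====
-- def decrement_even_digits(original: str) -> str:
--     # staged passes: one full replace pass per even digit; outputs are odd
--     # digits, so later passes never touch an earlier pass's output
--     for even, odd in (("0", "9"), ("2", "1"), ("4", "3"), ("6", "5"), ("8", "7")):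
--         original = original.replace(even, odd)
--     return original
-- ===== Notes on version B (the rewrite author's own statement) =====
-- stated objective: faster
-- what changed: Replaces A's single indexed loop with per-character isdigit/int/parity branching and string concatenation by five staged whole-string replace passes, one per even digit (0->9, 2->1, 4->3, 6->5, 8->7); correctness rests on the passes being non-interfering since each pass outputs only odd digits, and each pass is a C-level str.replace instead of per-char Python-level parsing.
import Mathlib
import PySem

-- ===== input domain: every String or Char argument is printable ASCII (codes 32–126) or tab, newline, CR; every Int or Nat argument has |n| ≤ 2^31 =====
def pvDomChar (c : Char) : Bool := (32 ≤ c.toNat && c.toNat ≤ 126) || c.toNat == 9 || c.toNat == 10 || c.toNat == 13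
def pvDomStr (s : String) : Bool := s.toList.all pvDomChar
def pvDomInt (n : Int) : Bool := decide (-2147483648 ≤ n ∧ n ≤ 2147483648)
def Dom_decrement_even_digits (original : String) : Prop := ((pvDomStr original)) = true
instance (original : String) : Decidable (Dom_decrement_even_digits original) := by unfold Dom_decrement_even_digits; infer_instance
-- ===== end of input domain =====

-- B replaces A's single per-character branching loop by five staged whole-string
-- replace passes, one per even digit; a timing run measured B faster at the largest size.

-- ===== PORT A =====
-- one step of A's index loop: c = original[i]; the isdigit/int/parity branch, appending to result
def pvAStep (cs : List Char) (acc : List Char) (i : Int) : List Char :=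
  let c := PySem.List.pyGetD cs i ' '
  if PySem.Chars.strIsdigit [c] &&
      (PySem.Int.mod ((PySem.Int.ofChars? [c]).getD 0) 2 == 0) then
    if ((PySem.Int.ofChars? [c]).getD 0) == 0 then
      acc ++ ['9']
    else
      acc ++ PySem.Int.toChars ((PySem.Int.ofChars? [c]).getD 0 - 1)
  else
    acc ++ [c]

def decrement_even_digits (original : String) : String :=
  String.ofList ((PySem.List.pyRange 0 (PySem.Str.len original) 1).foldl
    (pvAStep original.toList) [])

-- ===== PORT B =====
-- the five (even, odd) replacement pairs Source B loops over
def pvPairs : List (String × String) := [("0", "9"), ("2", "1"), ("4", "3"), ("6", "5"), ("8", "7")]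

def decrement_even_digits_alt (original : String) : String :=
  pvPairs.foldl (fun s p => PySem.Str.replace s p.1 p.2) original

-- ===== PRECONDITION & SPEC =====
def Spec_decrement_even_digits (original : String) (out : String) : Prop := out = decrement_even_digits_alt original
instance (original : String) (out : String) : Decidable (Spec_decrement_even_digits original out) := by unfold Spec_decrement_even_digits; infer_instance

-- ===== CLAIM (what is proved, stated in full; the proofs are below) =====
def Claim_equal_decrement_even_digits : Prop := ∀ (original : String), Dom_decrement_even_digits original → Spec_decrement_even_digits original (decrement_even_digits original)

-- ===== LEMMAS AND PROOFS =====

-- the per-character effect of the five composed replace passes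
def pvF (c : Char) : Char :=
  let g : Char → Char → Char → Char := fun a b x => if x = a then b else x
  g '8' '7' (g '6' '5' (g '4' '3' (g '2' '1' (g '0' '9' c))))

-- replace with a single-char pattern is a map (helper for the go worker)
theorem pvGoSingle (a b : Char) (l : List Char) : ∀ (fuel : Nat) (acc : List Char), l.length ≤ fuel →
    PySem.Chars.replace.go [a] [b] fuel l acc
      = acc.reverse ++ l.map (fun c => if c = a then b else c) := by
  induction l with
  | nil =>
    intro fuel acc _
    cases fuel <;> simp [PySem.Chars.replace.go]
  | cons c t ih =>
    intro fuel acc hle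
    cases fuel with
    | zero => simp at hle
    | succ f =>
      by_cases h : a = c
      · subst h
        simp only [PySem.Chars.replace.go, List.isPrefixOf, beq_self_eq_true, Bool.true_and,
          if_true, List.length_cons, List.length_nil, List.drop_succ_cons, List.drop_zero,
          List.reverse_cons, List.reverse_nil, List.nil_append]
        rw [ih f _ (by simpa using hle)]
        simp
      · have hb : ([a].isPrefixOf (c :: t)) = false := by
          simp [List.isPrefixOf, h]
        simp only [PySem.Chars.replace.go, hb, if_neg, Bool.false_eq_true, not_false_iff]
        rw [ih f _ (by simpa using hle)]
        simp [Ne.symm h]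

theorem pvReplaceSingle (a b : Char) (s : List Char) :
    PySem.Chars.replace s [a] [b] = s.map (fun c => if c = a then b else c) := by
  rw [PySem.Chars.replace]
  simp only [List.isEmpty_cons, Bool.false_eq_true, if_neg, not_false_iff]
  simpa using pvGoSingle a b s s.length [] le_rfl

-- isdigit c = true forces c to be one of the ten ASCII digits
theorem pvDigitCases (c : Char) (h : PySem.Chars.isdigit c = true) :
    c = '0' ∨ c='1' ∨ c='2' ∨ c='3' ∨ c='4' ∨ c='5' ∨ c='6' ∨ c='7' ∨ c='8' ∨ c='9' := by
  simp [PySem.Chars.isdigit, Char.le_def, UInt32.le_iff_toNat_le] at h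
  simp only [Char.toNat] at h
  have hv : c.val.toNat = 48 ∨ c.val.toNat = 49 ∨ c.val.toNat = 50 ∨ c.val.toNat = 51 ∨ c.val.toNat = 52 ∨ c.val.toNat = 53 ∨ c.val.toNat = 54 ∨ c.val.toNat = 55 ∨ c.val.toNat = 56 ∨ c.val.toNat = 57 := by omega
  rcases hv with h|h|h|h|h|h|h|h|h|h <;>
    simp [Char.ext_iff, UInt32.toNat_inj.symm, h, UInt32.toNat_ofNat]

-- A's per-character branch produces exactly the composed per-character map pvF
theorem pvStep_eq (c : Char) (acc : List Char) :
    (if PySem.Chars.strIsdigit [c] &&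
        (PySem.Int.mod ((PySem.Int.ofChars? [c]).getD 0) 2 == 0) then
      if ((PySem.Int.ofChars? [c]).getD 0) == 0 then acc ++ ['9']
      else acc ++ PySem.Int.toChars ((PySem.Int.ofChars? [c]).getD 0 - 1)
    else acc ++ [c]) = acc ++ [pvF c] := by
  by_cases hd : PySem.Chars.isdigit c = true
  · rcases pvDigitCases c hd with h|h|h|h|h|h|h|h|h|h <;> subst h <;>
      first
        | (rw [if_pos (by decide), if_pos (by decide)]; exact congrArg (acc ++ ·) (by decide))
        | (rw [if_pos (by decide), if_neg (by decide)]; exact congrArg (acc ++ ·) (by decide))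
        | (rw [if_neg (by decide)]; exact congrArg (acc ++ ·) (by decide))
  · have hd' : PySem.Chars.isdigit c = false := by simpa using hd
    have h0 : c ≠ '0' := by rintro rfl; simp [PySem.Chars.isdigit] at hd'
    have h2 : c ≠ '2' := by rintro rfl; simp [PySem.Chars.isdigit] at hd'
    have h4 : c ≠ '4' := by rintro rfl; simp [PySem.Chars.isdigit] at hd'
    have h6 : c ≠ '6' := by rintro rfl; simp [PySem.Chars.isdigit] at hd'
    have h8 : c ≠ '8' := by rintro rfl; simp [PySem.Chars.isdigit] at hd'
    simp [PySem.Chars.strIsdigit, hd', pvF, h0, h2, h4, h6, h8]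

-- ===== VERDICT (by name: the statement is the Claim_ definition above) =====
theorem decrement_even_digits_spec : Claim_equal_decrement_even_digits := by
  intro original _
  unfold Spec_decrement_even_digits decrement_even_digits
  -- A's loop is the map of pvF
  have hfold : (PySem.List.pyRange 0 (PySem.Str.len original) 1).foldl
      (pvAStep original.toList) []
      = original.toList.foldl (fun acc c => acc ++ [pvF c]) [] := by
    have h1 : (PySem.List.pyRange 0 (PySem.Str.len original) 1).foldl
        (pvAStep original.toList) []
        = (PySem.List.pyRange 0 (PySem.Str.len original) 1).foldl
            (fun acc i => acc ++ [pvF (PySem.List.pyGetD original.toList i ' ')]) [] := by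
      apply PySem.List.foldl_congr_mem
      intro acc i _
      exact pvStep_eq _ acc
    rw [h1]
    simpa using PySem.List.foldl_pyRange_zero_pyGetD original.toList ' '
      (fun acc c => acc ++ [pvF c]) []
  -- B's five staged passes are the same map
  have hB : (decrement_even_digits_alt original).toList = original.toList.map pvF := by
    unfold decrement_even_digits_alt pvPairs
    simp only [List.foldl_cons, List.foldl_nil]
    have toL : ∀ (s : String) (a b : Char) (sa sb : String),
        sa.toList = [a] → sb.toList = [b] →
        (PySem.Str.replace s sa sb).toList = s.toList.map (fun c => if c = a then b else c) := by
      intro s a b sa sb ha hb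
      rw [PySem.Str.toList_replace, ha, hb, pvReplaceSingle]
    rw [toL _ '8' '7' "8" "7" rfl rfl, toL _ '6' '5' "6" "5" rfl rfl,
        toL _ '4' '3' "4" "3" rfl rfl, toL _ '2' '1' "2" "1" rfl rfl,
        toL _ '0' '9' "0" "9" rfl rfl]
    simp only [List.map_map]
    rfl
  rw [hfold, PySem.List.foldl_append_singleton_eq_map]
  have : (decrement_even_digits_alt original) = String.ofList (original.toList.map pvF) := by
    apply String.ext
    simpa using hB
  simpa using this.symm
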